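-- pv_equiv track=rewrite | github.com/ReddTea/astroemperor | src/astroemperor/utils.py | find_common_integer_sequence
-- ===== SOURCE A (Python) =====
-- def find_common_integer_sequence(numbers):
--     # Extract the integer part and convert to string
--     str_numbers = [str(int(number)) for number in numbers]
--
--     # Check the length of the shortest number to avoid index errors
--     min_length = min(len(num) for num in str_numbers)
--
--     # Find common sequence
--     common_sequence = ''
--     for i in range(min_length):
--         # Check if this character is the same in all numbers
--         if all(num[i] == str_numbers[0][i] for num in str_numbers):
--             common_sequence += str_numbers[0][i]
--         else:
--             break
--
--     # Convert the common sequence back to a number, filling with zeros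
--     if common_sequence:
--         common_sequence = int(common_sequence + '0' * (len(str_numbers[0]) - len(common_sequence)))
--     else:
--         common_sequence = None
--
--     return common_sequence
-- ===== SOURCE B (Python) =====
-- def find_common_integer_sequence(numbers):
--     str_numbers = [str(int(number)) for number in numbers]
--
--     # The longest common prefix of all the strings equals the common
--     # prefix of the lexicographic minimum and maximum (min/max raise
--     # ValueError on an empty input, exactly like A's min()).
--     first_s = min(str_numbers)
--     last_s = max(str_numbers)
--     prefix_chars = []
--     for a, b in zip(first_s, last_s):
--         if a != b:
--             break
--         prefix_chars.append(a)
--     prefix = ''.join(prefix_chars)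
--
--     if prefix:
--         return int(prefix + '0' * (len(str_numbers[0]) - len(prefix)))
--     return None
-- ===== Notes on version B (the rewrite author's own statement) =====
-- stated objective: alternative
-- what changed: Instead of scanning every string at each character index, B takes the lexicographic min and max of the strings and computes the common prefix of just those two (LCP(all) = LCP(min,max)), then applies the same zero-padding finish.
-- outside the precondition, e.g. on find_common_integer_sequence([]): A raises ValueError, B raises ValueError
import Mathlib
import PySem

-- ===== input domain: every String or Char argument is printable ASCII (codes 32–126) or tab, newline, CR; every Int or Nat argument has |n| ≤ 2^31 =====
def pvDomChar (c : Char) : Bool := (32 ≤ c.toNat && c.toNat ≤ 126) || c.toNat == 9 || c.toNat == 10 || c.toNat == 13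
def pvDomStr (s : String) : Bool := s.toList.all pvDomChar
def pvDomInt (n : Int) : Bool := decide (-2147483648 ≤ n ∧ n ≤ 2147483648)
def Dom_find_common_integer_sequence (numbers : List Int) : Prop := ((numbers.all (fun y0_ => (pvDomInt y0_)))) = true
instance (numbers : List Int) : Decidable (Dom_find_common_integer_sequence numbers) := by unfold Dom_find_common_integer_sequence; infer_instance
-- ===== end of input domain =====

-- B replaces A's per-index scan over all strings by the classic identity
-- LCP(all) = LCP(lexicographic min, lexicographic max); same return values,
-- objective: alternative (different algorithm of similar size).


-- ===== PORT A =====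
-- the 'for i in range(min_length): … else: break' loop, building common_sequence;
-- fuel counts the remaining indices (min_length - i), so indexing stays in range
def pvLoopA (strs : List (List Char)) (first : List Char) : Nat → Nat → List Char
  | _, 0 => []
  | i, fuel + 1 =>
    if strs.all (fun num => num.getD i ' ' == first.getD i ' ') then
      first.getD i ' ' :: pvLoopA strs first (i + 1) fuel
    else []

def find_common_integer_sequence (numbers : List Int) : Option Int :=
  let str_numbers := numbers.map PySem.Int.toChars
  match str_numbers with
  | [] => none  -- Python: min() of an empty generator raises ValueError; excluded by Pre_
  | first :: rest =>
    let min_length := (rest.map List.length).foldl min first.length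
    let common_sequence := pvLoopA (first :: rest) first 0 min_length
    if common_sequence ≠ [] then
      PySem.Int.ofChars? (common_sequence ++ List.replicate (first.length - common_sequence.length) '0')
    else none

-- ===== PORT B =====
-- Python's '<' on strings: strict lexicographic order on the character codes
def pvLexLt : List Char → List Char → Bool
  | [], [] => false
  | [], _ :: _ => true
  | _ :: _, [] => false
  | a :: as, b :: bs => a < b || (a == b && pvLexLt as bs)

-- the zip/break loop of Source B: common prefix of two strings
def pvLcp : List Char → List Char → List Char
  | a :: as, b :: bs => if a == b then a :: pvLcp as bs else []
  | _, _ => []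

def find_common_integer_sequence_alt (numbers : List Int) : Option Int :=
  let str_numbers := numbers.map PySem.Int.toChars
  match str_numbers with
  | [] => none  -- Python: min() of an empty list raises ValueError; excluded by Pre_
  | h :: t =>
    let first_s := t.foldl (fun m s => if pvLexLt s m then s else m) h  -- min(str_numbers)
    let last_s := t.foldl (fun m s => if pvLexLt m s then s else m) h   -- max(str_numbers)
    let pref := pvLcp first_s last_s
    if pref ≠ [] then
      PySem.Int.ofChars? (pref ++ List.replicate (h.length - pref.length) '0')
    else none

-- ===== PRECONDITION & SPEC =====
-- on [] both Pythons raise ValueError (min/max of an empty sequence)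
def Pre_find_common_integer_sequence (numbers : List Int) : Prop := numbers ≠ []
instance (numbers : List Int) : Decidable (Pre_find_common_integer_sequence numbers) := by unfold Pre_find_common_integer_sequence; infer_instance
def pvWitness_find_common_integer_sequence : List Int := [17, 15]

def Spec_find_common_integer_sequence (numbers : List Int) (out : Option Int) : Prop := out = find_common_integer_sequence_alt numbers
instance (numbers : List Int) (out : Option Int) : Decidable (Spec_find_common_integer_sequence numbers out) := by unfold Spec_find_common_integer_sequence; infer_instance

-- ===== CLAIM (what is proved, stated in full; the proofs are below) =====
def Claim_equal_find_common_integer_sequence : Prop := ∀ (numbers : List Int), Dom_find_common_integer_sequence numbers → Pre_find_common_integer_sequence numbers → Spec_find_common_integer_sequence numbers (find_common_integer_sequence numbers)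

-- ===== LEMMAS AND PROOFS =====

theorem pvLcp_prefix_left (a b : List Char) : pvLcp a b <+: a := by
  fun_induction pvLcp a b with
  | case1 a as b bs h ih => simpa using ih
  | case2 => simp
  | case3 => simp

theorem pvLcp_prefix_right (a b : List Char) : pvLcp a b <+: b := by
  fun_induction pvLcp a b with
  | case1 a as b bs h ih => simp_all [List.cons_prefix_cons, (beq_iff_eq ..).1 h]
  | case2 => simp
  | case3 => simp

theorem foldl_pvLcp_prefix (t : List (List Char)) (a : List Char) :
    (t.foldl pvLcp a) <+: a ∧ ∀ x ∈ t, (t.foldl pvLcp a) <+: x := by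
  induction t generalizing a with
  | nil => simp
  | cons x xs ih =>
    obtain ⟨h1, h2⟩ := ih (pvLcp a x)
    refine ⟨h1.trans (pvLcp_prefix_left ..), ?_⟩
    intro y hy
    rcases List.mem_cons.1 hy with rfl | hy
    · exact h1.trans (pvLcp_prefix_right ..)
    · exact h2 y hy

theorem prefix_pvLcp {p a b : List Char} (ha : p <+: a) (hb : p <+: b) : p <+: pvLcp a b := by
  induction p generalizing a b with
  | nil => simp
  | cons c cs ih =>
    obtain ⟨a', rfl⟩ := ha
    obtain ⟨b', rfl⟩ := hb
    simp only [List.cons_append] at *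
    simp [pvLcp, List.cons_prefix_cons]
    exact ih (List.prefix_append ..) (List.prefix_append ..)

theorem prefix_foldl_pvLcp {p a : List Char} {t : List (List Char)}
    (ha : p <+: a) (ht : ∀ x ∈ t, p <+: x) : p <+: t.foldl pvLcp a := by
  induction t generalizing a with
  | nil => exact ha
  | cons x xs ih =>
    exact ih (prefix_pvLcp ha (ht x (by simp))) (fun y hy => ht y (by simp [hy]))

theorem foldl_pvLcp_map_cons (c : Char) (a : List Char) (l : List (List Char)) :
    (l.map (c :: ·)).foldl pvLcp (c :: a) = c :: l.foldl pvLcp a := by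
  induction l generalizing a with
  | nil => rfl
  | cons x xs ih => simpa [pvLcp] using ih (pvLcp a x)

theorem pvLexLt_irrefl (a : List Char) : pvLexLt a a = false := by
  induction a with
  | nil => rfl
  | cons c cs ih => simp [pvLexLt, ih]

theorem pvLexLt_trans : ∀ {a b c : List Char}, pvLexLt a b = true → pvLexLt b c = true →
    pvLexLt a c = true
  | [], _ :: _, _ :: _, _, _ => rfl
  | a :: as, b :: bs, c :: cs, h1, h2 => by
    simp only [pvLexLt, Bool.or_eq_true, Bool.and_eq_true, beq_iff_eq, decide_eq_true_eq] at *
    rcases h1 with h1 | ⟨rfl, h1⟩ <;> rcases h2 with h2 | ⟨rfl, h2⟩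
    · exact Or.inl (h1.trans h2)
    · exact Or.inl h1
    · exact Or.inl h2
    · exact Or.inr ⟨rfl, pvLexLt_trans h1 h2⟩

theorem foldl_min_spec (h : List Char) (t : List (List Char)) :
    (t.foldl (fun m s => if pvLexLt s m then s else m) h) ∈ h :: t ∧
    ∀ s ∈ h :: t, pvLexLt s (t.foldl (fun m s => if pvLexLt s m then s else m) h) = false := by
  suffices H : ∀ (acc : List Char) (pre : List (List Char)), acc ∈ pre →
      (∀ s ∈ pre, pvLexLt s acc = false) →
      (t.foldl (fun m s => if pvLexLt s m then s else m) acc) ∈ pre ++ t ∧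
      ∀ s ∈ pre ++ t, pvLexLt s (t.foldl (fun m s => if pvLexLt s m then s else m) acc) = false by
    simpa using H h [h] (by simp) (by simpa using pvLexLt_irrefl h)
  induction t with
  | nil => intro acc pre h1 h2; simpa using ⟨h1, h2⟩
  | cons x xs ih =>
    intro acc pre h1 h2
    simp only [List.foldl_cons]
    by_cases hx : pvLexLt x acc = true
    · rw [if_pos hx]
      have := ih x (pre ++ [x]) (by simp) ?_
      · refine ⟨by simpa using this.1, fun s hs => this.2 s (by simpa using hs)⟩
      · intro s hs
        rcases List.mem_append.1 hs with hs | hs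
        · cases hsx : pvLexLt s x with
          | false => rfl
          | true => have := pvLexLt_trans hsx hx; rw [h2 s hs] at this; exact absurd this (by simp)
        · simp only [List.mem_singleton] at hs; subst hs; exact pvLexLt_irrefl _
    · rw [if_neg hx]
      have := ih acc (pre ++ [x]) (by simp [h1]) ?_
      · refine ⟨by simpa using this.1, fun s hs => this.2 s (by simpa using hs)⟩
      · intro s hs
        rcases List.mem_append.1 hs with hs | hs
        · exact h2 s hs
        · simp only [List.mem_singleton] at hs; subst hs; exact Bool.eq_false_iff.2 hx

theorem foldl_max_spec (h : List Char) (t : List (List Char)) :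
    (t.foldl (fun m s => if pvLexLt m s then s else m) h) ∈ h :: t ∧
    ∀ s ∈ h :: t, pvLexLt (t.foldl (fun m s => if pvLexLt m s then s else m) h) s = false := by
  suffices H : ∀ (acc : List Char) (pre : List (List Char)), acc ∈ pre →
      (∀ s ∈ pre, pvLexLt acc s = false) →
      (t.foldl (fun m s => if pvLexLt m s then s else m) acc) ∈ pre ++ t ∧
      ∀ s ∈ pre ++ t, pvLexLt (t.foldl (fun m s => if pvLexLt m s then s else m) acc) s = false by
    simpa using H h [h] (by simp) (by simpa using pvLexLt_irrefl h)
  induction t with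
  | nil => intro acc pre h1 h2; simpa using ⟨h1, h2⟩
  | cons x xs ih =>
    intro acc pre h1 h2
    simp only [List.foldl_cons]
    by_cases hx : pvLexLt acc x = true
    · rw [if_pos hx]
      have := ih x (pre ++ [x]) (by simp) ?_
      · refine ⟨by simpa using this.1, fun s hs => this.2 s (by simpa using hs)⟩
      · intro s hs
        rcases List.mem_append.1 hs with hs | hs
        · cases hsx : pvLexLt x s with
          | false => rfl
          | true => have := pvLexLt_trans hx hsx; rw [h2 s hs] at this; exact absurd this (by simp)
        · simp only [List.mem_singleton] at hs; subst hs; exact pvLexLt_irrefl _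
    · rw [if_neg hx]
      have := ih acc (pre ++ [x]) (by simp [h1]) ?_
      · refine ⟨by simpa using this.1, fun s hs => this.2 s (by simpa using hs)⟩
      · intro s hs
        rcases List.mem_append.1 hs with hs | hs
        · exact h2 s hs
        · simp only [List.mem_singleton] at hs; subst hs; exact Bool.eq_false_iff.2 hx

theorem pvLcp_minmax_prefix : ∀ (mn mx s : List Char),
    pvLexLt s mn = false → pvLexLt mx s = false → pvLcp mn mx <+: s
  | [], mx, s, _, _ => by cases mx <;> simp [pvLcp]
  | _ :: _, [], s, _, _ => by simp [pvLcp]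
  | a :: as, b :: bs, [], h1, h2 => by simp [pvLexLt] at h1
  | a :: as, b :: bs, d :: ds, h1, h2 => by
    simp only [pvLexLt, Bool.or_eq_false_iff, Bool.and_eq_false_iff, beq_eq_false_iff_ne,
      decide_eq_false_iff_not] at h1 h2
    by_cases hab : a = b
    · subst hab
      have hda : d = a := le_antisymm (not_lt.1 h2.1) (not_lt.1 h1.1)
      subst hda
      have h1' : pvLexLt ds as = false := by
        rcases h1.2 with h | h
        · exact absurd rfl h
        · exact h
      have h2' : pvLexLt bs ds = false := by
        rcases h2.2 with h | h
        · exact absurd rfl h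
        · exact h
      simpa [pvLcp, List.cons_prefix_cons] using pvLcp_minmax_prefix as bs ds h1' h2'
    · simp [pvLcp, hab]

theorem pvLoopA_eq : ∀ (fuel i : Nat) (h : List Char) (t : List (List Char)),
    (∀ s ∈ h :: t, i + fuel ≤ s.length) → (∃ s ∈ h :: t, s.length = i + fuel) →
    pvLoopA (h :: t) h i fuel = (t.map (List.drop i)).foldl pvLcp (h.drop i) := by
  intro fuel
  induction fuel with
  | zero =>
    intro i h t _ hex
    obtain ⟨s, hs, hlen⟩ := hex
    have hdrop : s.drop i = [] := List.drop_eq_nil_of_le (by omega)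
    obtain ⟨h1, h2⟩ := foldl_pvLcp_prefix (t.map (List.drop i)) (h.drop i)
    have : (t.map (List.drop i)).foldl pvLcp (h.drop i) <+: [] := by
      rcases List.mem_cons.1 hs with rfl | hm
      · rw [← hdrop]; exact h1
      · rw [← hdrop]; exact h2 _ (List.mem_map_of_mem hm)
    rw [pvLoopA, List.prefix_nil.1 this]
  | succ fuel ih =>
    intro i h t hall hex
    have hlt : ∀ s ∈ h :: t, i < s.length := fun s hs => by have := hall s hs; omega
    rw [pvLoopA]
    by_cases hc : ((h :: t).all (fun num => num.getD i ' ' == h.getD i ' ')) = true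
    · rw [if_pos hc]
      have hgetD : ∀ s ∈ h :: t, s.getD i ' ' = h.getD i ' ' := by
        intro s hs
        exact beq_iff_eq.1 (List.all_eq_true.1 hc s hs)
      have hmap : t.map (List.drop i) = (t.map (List.drop (i+1))).map ((h.getD i ' ') :: ·) := by
        rw [List.map_map]
        apply List.map_congr_left
        intro s hs
        have hi := hlt s (by simp [hs])
        simp only [Function.comp_apply]
        rw [List.drop_eq_getElem_cons hi, ← List.getD_eq_getElem s ' ' hi, hgetD s (by simp [hs])]
      have hhdrop : h.drop i = h.getD i ' ' :: h.drop (i+1) := by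
        have hi := hlt h (by simp)
        rw [List.drop_eq_getElem_cons hi, List.getD_eq_getElem h ' ' hi]
      rw [hmap, hhdrop, foldl_pvLcp_map_cons,
        ih (i+1) h t (fun s hs => by have := hall s hs; omega)
          (by obtain ⟨s, hs, hl⟩ := hex; exact ⟨s, hs, by omega⟩)]
    · rw [if_neg hc]
      simp only [List.all_eq_true, not_forall] at hc
      obtain ⟨num, hnum, hne⟩ := hc
      have hne' : num.getD i ' ' ≠ h.getD i ' ' := by simpa using hne
      have hnum_t : num ∈ t := by
        rcases List.mem_cons.1 hnum with rfl | hm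
        · exact absurd rfl hne'
        · exact hm
      obtain ⟨h1, h2⟩ := foldl_pvLcp_prefix (t.map (List.drop i)) (h.drop i)
      cases hR : (t.map (List.drop i)).foldl pvLcp (h.drop i) with
      | nil => rfl
      | cons c r =>
        exfalso
        have hph : (c :: r) <+: h.drop i := hR ▸ h1
        have hpn : (c :: r) <+: num.drop i := hR ▸ h2 _ (List.mem_map_of_mem hnum_t)
        have hih := hlt h (by simp)
        have hin := hlt num (by simp [hnum_t])
        rw [List.drop_eq_getElem_cons hih] at hph
        rw [List.drop_eq_getElem_cons hin] at hpn
        rw [List.cons_prefix_cons] at hph hpn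
        apply hne'
        rw [List.getD_eq_getElem num ' ' hin, List.getD_eq_getElem h ' ' hih, ← hph.1, ← hpn.1]

theorem pvLcp_minmax_eq (h : List Char) (t : List (List Char)) :
    pvLcp (t.foldl (fun m s => if pvLexLt s m then s else m) h)
          (t.foldl (fun m s => if pvLexLt m s then s else m) h) = t.foldl pvLcp h := by
  obtain ⟨hmn_mem, hmn⟩ := foldl_min_spec h t
  obtain ⟨hmx_mem, hmx⟩ := foldl_max_spec h t
  obtain ⟨hfh, hft⟩ := foldl_pvLcp_prefix t h
  refine (prefix_pvLcp ?_ ?_).eq_of_length_le (prefix_foldl_pvLcp ?_ ?_).length_le |>.symm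
  · rcases List.mem_cons.1 hmn_mem with heq | hm
    · rw [heq]; exact hfh
    · exact hft _ hm
  · rcases List.mem_cons.1 hmx_mem with heq | hm
    · rw [heq]; exact hfh
    · exact hft _ hm
  · exact pvLcp_minmax_prefix _ _ h (hmn h (by simp)) (hmx h (by simp))
  · exact fun x hx => pvLcp_minmax_prefix _ _ x (hmn x (by simp [hx])) (hmx x (by simp [hx]))

-- ===== VERDICT (by name: the statement is the Claim_ definition above) =====
theorem find_common_integer_sequence_spec : Claim_equal_find_common_integer_sequence := by
  unfold Claim_equal_find_common_integer_sequence
  intro numbers _ hpre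
  unfold Spec_find_common_integer_sequence
  cases numbers with
  | nil => exact absurd rfl hpre
  | cons n ns =>
    simp only [find_common_integer_sequence, find_common_integer_sequence_alt, List.map_cons]
    set h := PySem.Int.toChars n with hh
    set t := ns.map PySem.Int.toChars with ht
    set minLen := (t.map List.length).foldl min h.length with hm
    have hle := PySem.List.foldl_min_le (t.map List.length) h.length
    have hmem := PySem.List.foldl_min_mem (t.map List.length) h.length
    have hall : ∀ s ∈ h :: t, 0 + minLen ≤ s.length := by
      intro s hs
      rcases List.mem_cons.1 hs with rfl | hmt
      · simpa using hle.1
      · simpa using hle.2 _ (List.mem_map_of_mem hmt)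
    have hex : ∃ s ∈ h :: t, s.length = 0 + minLen := by
      rcases hmem with heq | hmt
      · exact ⟨h, by simp, by omega⟩
      · obtain ⟨s, hs, hlen⟩ := List.mem_map.1 hmt
        exact ⟨s, by simp [hs], by omega⟩
    have hdrop0 : t.map (List.drop 0) = t := by
      rw [show (List.drop 0 : List Char → List Char) = id from funext fun s => List.drop_zero,
        List.map_id]
    rw [pvLoopA_eq minLen 0 h t hall hex, pvLcp_minmax_eq h t, hdrop0, List.drop_zero]
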